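-- pv_equiv track=rewrite | github.com/snpushpi/CTCL-Solutions | most_freq.py/string_ignorance.py | ignore_string
-- ===== SOURCE A (Python) =====
-- def ignore_string(string):
--     count_dic = {}
--     result_string = ''
--     for char in string:
--         if char in count_dic:
--             count_dic[char]+=1
--         else:
--             count_dic[char]=1
--         if count_dic[char]%2==1:
--             result_string+=char
--     return result_string
-- ===== SOURCE B (Python) =====
-- def ignore_string(string):
--     # Pair-cancellation: emit the front char, then cancel its next
--     # (partner) occurrence from the remaining characters; repeat.
--     chars = list(string)
--     out = []
--     while chars:
--         c = chars.pop(0)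
--         out.append(c)
--         if c in chars:
--             chars.remove(c)
--     return ''.join(out)
-- ===== Notes on version B (the rewrite author's own statement) =====
-- stated objective: alternative
-- what changed: Replaces A's counting dict with %2 tests by pair-cancellation: emit the front character and delete its next occurrence from the remaining characters, so no counts or parities are ever maintained.
import Mathlib
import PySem

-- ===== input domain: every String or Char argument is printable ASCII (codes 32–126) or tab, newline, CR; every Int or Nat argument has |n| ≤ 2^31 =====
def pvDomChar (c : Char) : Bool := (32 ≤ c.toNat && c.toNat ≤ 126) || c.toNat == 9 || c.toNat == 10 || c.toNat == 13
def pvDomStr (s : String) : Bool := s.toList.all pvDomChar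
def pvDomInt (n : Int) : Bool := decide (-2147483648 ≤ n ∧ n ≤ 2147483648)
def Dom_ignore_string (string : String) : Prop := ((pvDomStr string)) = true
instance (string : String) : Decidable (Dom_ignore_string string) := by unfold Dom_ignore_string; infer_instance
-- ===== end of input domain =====

-- B replaces A's counting dict and %2 test by pair-cancellation: emit the front char and delete its next occurrence from the remainder (alternative algorithm, not faster).


-- ===== PORT A =====
-- for char in string: count in dict, then append char when its count is odd
def ignoreLoopA : List Char → PySem.Dict Char Int → String → String
  | [], _, res => res
  | c :: rest, d, res =>
    let d' := if d.contains c then d.insert c (d.getD c 0 + 1) else d.insert c 1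
    let res' := if PySem.Int.mod (d'.getD c 0) 2 == 1 then res ++ String.ofList [c] else res
    ignoreLoopA rest d' res'

def ignore_string (string : String) : String :=
  ignoreLoopA string.toList PySem.Dict.empty ""

-- ===== PORT B =====
-- while chars: c = chars.pop(0); out.append(c); if c in chars: chars.remove(c)
lemma removeNext_length_le (chars : List Char) (c : Char) :
    (if chars.contains c then (PySem.List.remove? chars c).getD chars else chars).length
      ≤ chars.length := by
  by_cases h : c ∈ chars
  · rw [if_pos (by simpa using h), PySem.List.remove?_eq_some_erase chars c h]
    simpa using (List.length_erase_le : (chars.erase c).length ≤ chars.length)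
  · rw [if_neg (by simpa using h)]

def ignoreLoopB : List Char → List Char → List Char
  | [], out => out
  | c :: chars, out =>
    let chars' := if chars.contains c then (PySem.List.remove? chars c).getD chars else chars
    ignoreLoopB chars' (out ++ [c])
  termination_by chars _ => chars.length
  decreasing_by
    exact Nat.lt_succ_of_le (removeNext_length_le chars c)

def ignore_string_alt (string : String) : String :=
  String.ofList (ignoreLoopB string.toList [])

-- ===== PRECONDITION & SPEC =====
def Spec_ignore_string (string : String) (out : String) : Prop := out = ignore_string_alt string
instance (string : String) (out : String) : Decidable (Spec_ignore_string string out) := by unfold Spec_ignore_string; infer_instance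

-- ===== CLAIM (what is proved, stated in full; the proofs are below) =====
def Claim_equal_ignore_string : Prop := ∀ (string : String), Dom_ignore_string string → Spec_ignore_string string (ignore_string string)

-- ===== LEMMAS AND PROOFS =====

-- proof-only intermediary: parity-toggle characterisation of the kept characters
def g : List Char → PySem.Set Char → List Char
  | [], _ => []
  | c :: rest, S =>
    if PySem.Set.contains S c then g rest (PySem.Set.discard S c)
    else c :: g rest (PySem.Set.add S c)

lemma g_congr (l : List Char) (S T : PySem.Set Char) (h : ∀ x, x ∈ S ↔ x ∈ T) :
    g l S = g l T := by
  induction l generalizing S T with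
  | nil => rfl
  | cons c rest ih =>
    by_cases hm : c ∈ S
    · rw [g, g, if_pos ((PySem.Set.contains_iff S c).mpr hm),
        if_pos ((PySem.Set.contains_iff T c).mpr ((h c).mp hm))]
      exact ih _ _ (fun x => by rw [PySem.Set.mem_discard, PySem.Set.mem_discard, h x])
    · rw [g, g, if_neg (fun hh => hm ((PySem.Set.contains_iff S c).mp hh)),
        if_neg (fun hh => hm ((h c).mpr ((PySem.Set.contains_iff T c).mp hh)))]
      congr 1
      exact ih _ _ (fun x => by rw [PySem.Set.mem_add, PySem.Set.mem_add, h x])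

lemma g_add_erase (l : List Char) (S : PySem.Set Char) (c : Char) (hc : c ∉ S) :
    g l (PySem.Set.add S c) = g (l.erase c) S := by
  induction l generalizing S with
  | nil => simp [List.erase_nil, g]
  | cons x rest ih =>
    by_cases hx : x = c
    · subst hx
      rw [List.erase_cons_head, g,
        if_pos ((PySem.Set.contains_iff _ _).mpr (by rw [PySem.Set.mem_add]; right; rfl))]
      exact g_congr rest _ S (fun y => by
        rw [PySem.Set.mem_discard, PySem.Set.mem_add]
        constructor
        · rintro ⟨h | h, hne⟩
          · exact h
          · exact absurd h hne
        · intro hy; exact ⟨Or.inl hy, fun he => hc (he ▸ hy)⟩)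
    · rw [List.erase_cons_tail (by simpa using hx), g, g]
      by_cases hxs : x ∈ S
      · rw [if_pos ((PySem.Set.contains_iff _ _).mpr (by rw [PySem.Set.mem_add]; exact Or.inl hxs)),
          if_pos ((PySem.Set.contains_iff _ _).mpr hxs)]
        rw [g_congr rest _ (PySem.Set.add (PySem.Set.discard S x) c) (fun y => by
          rw [PySem.Set.mem_discard, PySem.Set.mem_add, PySem.Set.mem_add, PySem.Set.mem_discard]
          constructor
          · rintro ⟨h | h, hne⟩
            · exact Or.inl ⟨h, hne⟩
            · exact Or.inr h
          · rintro (⟨h, hne⟩ | h)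
            · exact ⟨Or.inl h, hne⟩
            · exact ⟨Or.inr h, fun he => hx (he ▸ h)⟩)]
        exact ih (PySem.Set.discard S x) (fun hcd => hc ((PySem.Set.mem_discard _ _ _).mp hcd).1)
      · rw [if_neg (fun hh => by
            rcases (PySem.Set.mem_add _ _ _).mp ((PySem.Set.contains_iff _ _).mp hh) with h | h
            · exact hxs h
            · exact hx h),
          if_neg (fun hh => hxs ((PySem.Set.contains_iff _ _).mp hh))]
        congr 1
        rw [g_congr rest _ (PySem.Set.add (PySem.Set.add S x) c) (fun y => by
          rw [PySem.Set.mem_add, PySem.Set.mem_add, PySem.Set.mem_add, PySem.Set.mem_add]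
          tauto)]
        exact ih (PySem.Set.add S x) (fun hca => by
          rcases (PySem.Set.mem_add _ _ _).mp hca with h | h
          · exact hc h
          · exact hx h.symm)

lemma loopB_eq : ∀ (n : ℕ) (l : List Char), l.length ≤ n → ∀ out,
    ignoreLoopB l out = out ++ g l PySem.Set.empty := by
  intro n
  induction n with
  | zero =>
    intro l hl out
    have : l = [] := List.eq_nil_of_length_eq_zero (Nat.le_zero.mp hl)
    subst this
    simp [ignoreLoopB, g]
  | succ n ih =>
    intro l hl out
    cases l with
    | nil => simp [ignoreLoopB, g]
    | cons c rest =>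
      rw [ignoreLoopB]
      have herase : (if rest.contains c then (PySem.List.remove? rest c).getD rest else rest)
          = rest.erase c := by
        by_cases h : c ∈ rest
        · rw [if_pos (by simpa using h), PySem.List.remove?_eq_some_erase rest c h]; rfl
        · rw [if_neg (by simpa using h), List.erase_of_not_mem h]
      simp only [herase]
      rw [ih (rest.erase c)
        (le_trans List.length_erase_le (Nat.le_of_succ_le_succ hl)) (out ++ [c])]
      have hg : g (c :: rest) PySem.Set.empty = c :: g (rest.erase c) PySem.Set.empty := by
        rw [g, if_neg (by simp [PySem.Set.empty, PySem.Set.contains])]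
        rw [← g_add_erase rest PySem.Set.empty c (by simp [PySem.Set.empty])]
      rw [hg]
      simp

lemma mod2_succ (n : Int) (_ : 0 ≤ n) :
    PySem.Int.mod (n + 1) 2 = 1 ↔ ¬ PySem.Int.mod n 2 = 1 := by
  rw [PySem.Int.mod_eq_emod_of_pos (by norm_num), PySem.Int.mod_eq_emod_of_pos (by norm_num)]
  omega

lemma ignore_loop_eq (l : List Char) (d : PySem.Dict Char Int) (s : PySem.Set Char)
    (res : List Char)
    (h0 : ∀ x, 0 ≤ d.getD x 0)
    (hinv : ∀ x, x ∈ s ↔ PySem.Int.mod (d.getD x 0) 2 = 1) :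
    ignoreLoopA l d (String.ofList res) = String.ofList (res ++ g l s) := by
  induction l generalizing d s res with
  | nil => simp [ignoreLoopA, g]
  | cons c rest ih =>
    have hd' : (if d.contains c then d.insert c (d.getD c 0 + 1) else d.insert c 1)
        = d.insert c (d.getD c 0 + 1) := by
      by_cases hc : d.contains c = true
      · simp [hc]
      · have h1 : d.getD c 0 = 0 :=
          PySem.Dict.getD_of_not_contains d 0 (by simpa using hc)
        simp [hc, h1]
    have hget : ∀ x, ((d.insert c (d.getD c 0 + 1)).getD x 0)
        = if x = c then d.getD c 0 + 1 else d.getD x 0 :=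
      fun x => PySem.Dict.getD_insert d c x _ 0
    have h0' : ∀ x, 0 ≤ (d.insert c (d.getD c 0 + 1)).getD x 0 := by
      intro x; rw [hget]; split
      · have := h0 c; omega
      · exact h0 x
    have hsucc := mod2_succ (d.getD c 0) (h0 c)
    by_cases hc : c ∈ s
    · have hodd : PySem.Int.mod (d.getD c 0) 2 = 1 := (hinv c).mp hc
      have hcond : (PySem.Int.mod ((d.insert c (d.getD c 0 + 1)).getD c 0) 2 == 1) = false := by
        rw [hget, if_pos rfl]
        simp only [beq_eq_false_iff_ne, ne_eq]
        exact fun h => (hsucc.mp h) hodd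
      rw [ignoreLoopA, g]
      simp only [hd', hcond, Bool.false_eq_true, if_false,
        if_pos ((PySem.Set.contains_iff s c).mpr hc)]
      refine ih _ _ _ h0' ?_
      intro x
      rw [hget, PySem.Set.mem_discard]
      by_cases hx : x = c
      · subst hx
        simp only [ne_eq, not_true_eq_false, and_false, false_iff]
        exact fun h => (hsucc.mp h) hodd
      · simp [hx, hinv x]
    · have heven : ¬ PySem.Int.mod (d.getD c 0) 2 = 1 := fun h => hc ((hinv c).mpr h)
      have hcond : (PySem.Int.mod ((d.insert c (d.getD c 0 + 1)).getD c 0) 2 == 1) = true := by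
        rw [hget, if_pos rfl]
        simpa using hsucc.mpr heven
      rw [ignoreLoopA, g]
      simp only [hd', hcond, if_true,
        if_neg (fun h => hc ((PySem.Set.contains_iff s c).mp h))]
      have hres : String.ofList res ++ String.ofList [c] = String.ofList (res ++ [c]) := by
        simp
      rw [hres]
      have := ih (d.insert c (d.getD c 0 + 1)) (PySem.Set.add s c) (res ++ [c]) h0' (by
        intro x
        rw [hget, PySem.Set.mem_add]
        by_cases hx : x = c
        · subst hx
          simp only [or_true, true_iff]
          exact hsucc.mpr heven
        · simp [hx, hinv x])
      rw [this]
      simp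

-- ===== VERDICT (by name: the statement is the Claim_ definition above) =====
theorem ignore_string_spec : Claim_equal_ignore_string := by
  intro string _
  unfold Spec_ignore_string ignore_string ignore_string_alt
  have hA := ignore_loop_eq string.toList PySem.Dict.empty PySem.Set.empty []
    (by intro x; simp [PySem.Dict.getD_empty])
    (by intro x; simp [PySem.Dict.getD_empty, PySem.Set.empty, PySem.Int.mod])
  have hB := loopB_eq string.toList.length string.toList le_rfl []
  rw [hB]
  simpa using hA
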